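-- pv_equiv track=rewrite | github.com/DavidA94/Tic-tac-toe-Game-Python- | console_game.py | get_vertical_winner
-- ===== SOURCE A (Python) =====
-- from typing import List, Tuple
--
-- NEUTRAL_PLAYER = ' '
--
-- def get_vertical_winner(board: List[List[str]]) -> chr:
--     """
--     Checks all vertical rows for a winner
--     :param board: The board to process
--     :return: The winner or NEUTRAL_PLAYER if nobody has won
--     """
--
--     # Loop through all columns
--     for col in range(len(board)):
--         # Get the entry of the first cell in the column
--         winner = board[0][col]
--
--         # Loop through all the rows
--         for row in range(len(board)):
--             cell = board[row][col]
--
--             # If we haven't already found a blank cell this row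
--             # and if the current cell is not our current value,
--             # then set it to be a NEUTRAL_PLAYER (not a winner)
--             if winner != NEUTRAL_PLAYER and cell != winner:
--                 winner = NEUTRAL_PLAYER
--                 break
--
--         # Return the player if they won
--         if winner != NEUTRAL_PLAYER:
--             return winner
--
--     # If we make it this far, then we did not find a winner
--     return NEUTRAL_PLAYER
-- ===== SOURCE B (Python) =====
-- from typing import List
--
-- NEUTRAL_PLAYER = ' '
--
-- def get_vertical_winner(board: List[List[str]]) -> chr:
--     """Single row-major sweep: start with every column's first cell as its
--     candidate, eliminate candidates as rows go by, then pick the first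
--     surviving non-neutral candidate."""
--     n = len(board)
--     cand = [board[0][c] for c in range(n)] if board else []
--     for row in board:
--         for c in range(n):
--             if cand[c] is not None and row[c] != cand[c]:
--                 cand[c] = None
--     for w in cand:
--         if w is not None and w != NEUTRAL_PLAYER:
--             return w
--     return NEUTRAL_PLAYER
-- ===== Notes on version B (the rewrite author's own statement) =====
-- stated objective: alternative
-- what changed: Replaces A's column-major scans (a fresh early-break pass down each column with a mutable winner) by a single row-major sweep that maintains a per-column candidate vector, eliminating candidates as each row passes, followed by one pick pass over the survivors.
-- outside the precondition, e.g. on get_vertical_winner([['x', 'o'], ['x']]): A returns 'x', B raises IndexError; on get_vertical_winner([['x', 'x', 'x'], ['y', 'y', 'y'], ['z']]): A returns ' ', B returns ' '; on get_vertical_winner([[]]): A raises IndexError, B raises IndexError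
import Mathlib
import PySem

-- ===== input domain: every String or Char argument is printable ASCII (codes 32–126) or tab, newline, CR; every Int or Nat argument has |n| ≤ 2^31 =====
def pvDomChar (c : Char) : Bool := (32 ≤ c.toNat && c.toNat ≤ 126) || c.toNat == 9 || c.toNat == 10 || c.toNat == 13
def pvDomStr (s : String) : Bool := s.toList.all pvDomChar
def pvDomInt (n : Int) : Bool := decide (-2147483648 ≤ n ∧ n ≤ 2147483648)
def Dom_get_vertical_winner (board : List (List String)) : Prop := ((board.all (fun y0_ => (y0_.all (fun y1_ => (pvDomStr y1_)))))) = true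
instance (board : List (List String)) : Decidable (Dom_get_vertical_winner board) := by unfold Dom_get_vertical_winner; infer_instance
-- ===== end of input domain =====

-- B replaces A's column-major early-break scans by a single row-major sweep over the board that
-- eliminates per-column candidates, then picks the first surviving non-neutral one (alternative, same cost).

-- ===== PORT A =====
-- board[row][col]; 'none' would be Python's IndexError, which Pre_ excludes (modelled as "").
def pvCell (board : List (List String)) (row col : Nat) : String :=
  (board[row]?.bind (fun r => r[col]?)).getD ""

-- the inner 'for row in range(len(board))' with its break
def pvRowLoop (board : List (List String)) (col : Nat) (rows : List Nat) (winner : String) : String :=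
  match rows with
  | [] => winner
  | row :: rest =>
    let cell := pvCell board row col
    if winner ≠ " " ∧ cell ≠ winner then " "      -- winner = NEUTRAL_PLAYER; break
    else pvRowLoop board col rest winner

-- the outer 'for col in range(len(board))' with its early return
def pvColLoop (board : List (List String)) (cols : List Nat) : String :=
  match cols with
  | [] => " "
  | col :: rest =>
    let winner := pvRowLoop board col (List.range board.length) (pvCell board 0 col)
    if winner ≠ " " then winner else pvColLoop board rest

def get_vertical_winner (board : List (List String)) : String :=
  pvColLoop board (List.range board.length)

-- ===== PORT B =====
-- the inner 'for c in range(n)' pass of one row over the candidate vector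
-- (row[c] out of range would be Python's IndexError, which Pre_ excludes; modelled as "")
def pvElimRow (n : Nat) (cand : List (Option String)) (row : List String) : List (Option String) :=
  (List.range n).map (fun c =>
    match cand.getD c none with
    | none => none
    | some w => if row.getD c "" ≠ w then none else some w)

-- the final 'for w in cand' pick loop
def pvPick : List (Option String) → String
  | [] => " "
  | none :: rest => pvPick rest
  | some w :: rest => if w ≠ " " then w else pvPick rest

def get_vertical_winner_alt (board : List (List String)) : String :=
  let n := board.length
  let cand0 := (List.range n).map (fun c => some ((board.headD []).getD c ""))
  pvPick (board.foldl (pvElimRow n) cand0)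

-- ===== PRECONDITION & SPEC =====
-- Pre_ excludes ragged boards having a row shorter than the number of rows: there A either
-- raises IndexError or returns a value that depends on which break rescued the scan of an
-- incomplete column — an accident of A's traversal order; the square board is the function's
-- natural domain, and B raises IndexError on most such boards.
def Pre_get_vertical_winner (board : List (List String)) : Prop :=
  ∀ r ∈ board, board.length ≤ r.length
instance (board : List (List String)) : Decidable (Pre_get_vertical_winner board) := by
  unfold Pre_get_vertical_winner; infer_instance

def pvWitness_get_vertical_winner : List (List String) :=
  [["x", "o", " "], ["x", "o", " "], ["x", " ", "o"]]

def Spec_get_vertical_winner (board : List (List String)) (out : String) : Prop := out = get_vertical_winner_alt board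
instance (board : List (List String)) (out : String) : Decidable (Spec_get_vertical_winner board out) := by unfold Spec_get_vertical_winner; infer_instance

-- ===== CLAIM (what is proved, stated in full; the proofs are below) =====
def Claim_equal_get_vertical_winner : Prop := ∀ (board : List (List String)), Dom_get_vertical_winner board → Pre_get_vertical_winner board → Spec_get_vertical_winner board (get_vertical_winner board)

-- ===== LEMMAS AND PROOFS =====

-- the inner loop started at NEUTRAL stays NEUTRAL
theorem pvRowLoop_neutral (board : List (List String)) (col : Nat) (rows : List Nat) :
    pvRowLoop board col rows " " = " " := by
  induction rows with
  | nil => rfl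
  | cons r rest ih => simp [pvRowLoop, ih]

-- the inner loop started at a non-neutral winner checks uniformity of the column
theorem pvRowLoop_char (board : List (List String)) (col : Nat) (rows : List Nat)
    (w : String) (hw : w ≠ " ") :
    pvRowLoop board col rows w =
      if ∀ r ∈ rows, pvCell board r col = w then w else " " := by
  induction rows with
  | nil => simp [pvRowLoop]
  | cons r rest ih =>
    by_cases hc : pvCell board r col = w
    · simp [pvRowLoop, hc, ih]
    · simp [pvRowLoop, hw, hc]

-- under Pre_, a cell read through option-indexing is the total getD read
theorem pvCell_eq (board : List (List String)) (hpre : Pre_get_vertical_winner board)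
    (row col : Nat) (hrow : row < board.length) (hcol : col < board.length) :
    pvCell board row col = (board.getD row []).getD col "" := by
  have hlen : board.length ≤ board[row].length :=
    hpre _ (List.getElem_mem hrow)
  have hc : col < board[row].length := lt_of_lt_of_le hcol hlen
  simp [pvCell, List.getD, List.getElem?_eq_getElem hrow, List.getElem?_eq_getElem hc]

-- one elimination pass, read at an in-range column
theorem pvElimRow_getD (n : Nat) (cand : List (Option String)) (row : List String)
    (c : Nat) (hc : c < n) :
    (pvElimRow n cand row).getD c none =
      match cand.getD c none with
      | none => none
      | some w => if row.getD c "" ≠ w then none else some w := by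
  simp [pvElimRow, List.getD, List.getElem?_map, List.getElem?_range hc]

-- the whole row fold, read at an in-range column: the candidate survives
-- exactly when every processed row agrees with it
theorem foldElim_getD (n : Nat) (L : List (List String)) (cand : List (Option String))
    (c : Nat) (hc : c < n) :
    (L.foldl (pvElimRow n) cand).getD c none =
      match cand.getD c none with
      | none => none
      | some w => if ∀ r ∈ L, r.getD c "" = w then some w else none := by
  induction L generalizing cand with
  | nil => cases h : cand.getD c none <;> simp [List.getD] at h <;> simp [List.getD, h]
  | cons r rest ih =>
    simp only [List.foldl_cons]
    rw [ih, pvElimRow_getD n cand r c hc]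
    cases hcd : cand.getD c none with
    | none => rfl
    | some w =>
      by_cases hr : r.getD c "" = w
      · by_cases hrest : ∀ r' ∈ rest, r'.getD c "" = w
        · simp only [List.getD] at hr hrest ⊢
          simp [hr, hrest]
        · simp only [List.getD] at hr hrest ⊢
          simp [hr, hrest]
      · simp only [List.getD] at hr ⊢
        simp [hr]

-- an elimination pass has length n, hence so does the whole fold on a length-n start
theorem foldElim_length (n : Nat) (L : List (List String)) (cand : List (Option String))
    (h : cand.length = n) : (L.foldl (pvElimRow n) cand).length = n := by
  induction L generalizing cand with
  | nil => exact h
  | cons r rest ih => exact ih _ (by simp [pvElimRow])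

-- the two loops agree on any list of in-range column indices, given the per-column verdict g
theorem loops_eq (board : List (List String)) (hpre : Pre_get_vertical_winner board)
    (hne : board ≠ []) (g : Nat → Option String)
    (hg : ∀ c, c < board.length →
      g c = if ∀ r ∈ board, r.getD c "" = (board.headD []).getD c ""
            then some ((board.headD []).getD c "") else none)
    (L : List Nat) (hL : ∀ c ∈ L, c < board.length) :
    pvColLoop board L = pvPick (L.map g) := by
  have h0 : (0 : Nat) < board.length := by
    cases board with
    | nil => exact absurd rfl hne
    | cons a t => simp
  induction L with
  | nil => rfl
  | cons c rest ih =>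
    have hc : c < board.length := hL c (by simp)
    have hhead : pvCell board 0 c = (board.headD []).getD c "" := by
      rw [pvCell_eq board hpre 0 c h0 hc]
      cases board with
      | nil => exact absurd rfl hne
      | cons a t => simp [List.getD]
    have hcells : (∀ r ∈ List.range board.length, pvCell board r c = pvCell board 0 c) ↔
        (∀ r ∈ board, r.getD c "" = (board.headD []).getD c "") := by
      constructor
      · intro h r hr
        obtain ⟨i, hi, rfl⟩ := List.mem_iff_getElem.mp hr
        have := h i (List.mem_range.mpr hi)
        rw [pvCell_eq board hpre i c hi hc, hhead] at this
        simpa [List.getD, List.getElem?_eq_getElem hi] using this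
      · intro h r hr
        have hri := List.mem_range.mp hr
        rw [pvCell_eq board hpre r c hri hc, hhead]
        have := h board[r] (List.getElem_mem hri)
        simpa [List.getD, List.getElem?_eq_getElem hri] using this
    have ihr := ih (fun x hx => hL x (by simp [hx]))
    simp only [pvColLoop, List.map_cons]
    rw [hg c hc]
    by_cases huni : ∀ r ∈ board, r.getD c "" = (board.headD []).getD c ""
    · rw [if_pos huni]
      by_cases hb : pvCell board 0 c = " "
      · rw [hb, pvRowLoop_neutral]
        simp only [ne_eq, not_true_eq_false, if_false, pvPick]
        rw [← hhead, hb]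
        simp [ihr]
      · rw [pvRowLoop_char board c _ _ hb, if_pos (hcells.mpr huni)]
        simp only [pvPick, ← hhead]
        simp [hb]
    · rw [if_neg huni]
      have hnu : ¬ ∀ r ∈ List.range board.length, pvCell board r c = pvCell board 0 c :=
        fun h => huni (hcells.mp h)
      by_cases hb : pvCell board 0 c = " "
      · rw [hb, pvRowLoop_neutral]; simp [pvPick, ihr]
      · rw [pvRowLoop_char board c _ _ hb, if_neg hnu]; simp [pvPick, ihr]

-- ===== VERDICT (by name: the statement is the Claim_ definition above) =====
theorem get_vertical_winner_spec : Claim_equal_get_vertical_winner := by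
  intro board _ hpre
  unfold Spec_get_vertical_winner get_vertical_winner get_vertical_winner_alt
  by_cases hne : board = []
  · subst hne; rfl
  · show pvColLoop board (List.range board.length) =
        pvPick (board.foldl (pvElimRow board.length)
          ((List.range board.length).map (fun c => some ((board.headD []).getD c ""))))
    set n := board.length with hn
    set cand0 := (List.range n).map (fun c => some ((board.headD []).getD c "")) with hcand0
    set final := board.foldl (pvElimRow n) cand0 with hfinal
    have hlen : final.length = n := foldElim_length n board cand0 (by simp [hcand0])
    have hc0 : ∀ c, c < n → cand0.getD c none = some ((board.headD []).getD c "") := by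
      intro c hc
      simp [hcand0, List.getD, List.getElem?_map, List.getElem?_range hc]
    have hgD : ∀ c, c < n → final.getD c none =
        (if ∀ r ∈ board, r.getD c "" = (board.headD []).getD c ""
         then some ((board.headD []).getD c "") else none) := by
      intro c hc
      rw [hfinal, foldElim_getD n board cand0 c hc, hc0 c hc]
    have hmap : final = (List.range n).map (fun c => final.getD c none) := by
      apply List.ext_getElem (by simp [hlen])
      intro i h1 h2
      have hi : i < n := by simpa [hlen] using h1
      simp [List.getElem_map, List.getElem_range, List.getD, List.getElem?_eq_getElem h1]
    rw [show pvPick final = pvPick ((List.range n).map (fun c => final.getD c none)) from by rw [← hmap]]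
    exact loops_eq board hpre hne (fun c => final.getD c none) hgD (List.range n)
      (fun c hc => List.mem_range.mp hc)
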